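-- pv_equiv track=rewrite | github.com/wyatt727/upnp-cli | upnp_cli/profile_generation/enhanced_profile_generator.py | _categorize_action
-- ===== SOURCE A (Python) =====
-- def _categorize_action(action_name: str) -> str:
--     """Categorize action by function."""
--     action_lower = action_name.lower()
--
--     if any(keyword in action_lower for keyword in ['play', 'pause', 'stop', 'next', 'previous', 'seek']):
--         return "media_control"
--     elif any(keyword in action_lower for keyword in ['volume', 'mute', 'bass', 'treble']):
--         return "volume_control"
--     elif any(keyword in action_lower for keyword in ['get', 'info', 'status', 'current', 'list']):
--         return "information_retrieval"
--     elif any(keyword in action_lower for keyword in ['set', 'config', 'update', 'add', 'remove']):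
--         return "configuration"
--     elif any(keyword in action_lower for keyword in ['auth', 'security', 'login', 'password']):
--         return "security"
--     else:
--         return "other"
-- ===== SOURCE B (Python) =====
-- # Flat keyword->priority map reduced with a running minimum: the category is the
-- # best (lowest) priority among all matching keywords; no branch cascade, no early return.
-- _KEYWORD_RANK = {
--     'play': 0, 'pause': 0, 'stop': 0, 'next': 0, 'previous': 0, 'seek': 0,
--     'volume': 1, 'mute': 1, 'bass': 1, 'treble': 1,
--     'get': 2, 'info': 2, 'status': 2, 'current': 2, 'list': 2,
--     'set': 3, 'config': 3, 'update': 3, 'add': 3, 'remove': 3,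
--     'auth': 4, 'security': 4, 'login': 4, 'password': 4,
-- }
--
-- _CATEGORIES = ("media_control", "volume_control", "information_retrieval",
--                "configuration", "security", "other")
--
-- def _categorize_action(action_name: str) -> str:
--     s = action_name.lower()
--     best = 5
--     for kw, rank in _KEYWORD_RANK.items():
--         if kw in s:
--             best = min(best, rank)
--     return _CATEGORIES[best]
-- ===== Notes on version B (the rewrite author's own statement) =====
-- stated objective: alternative
-- what changed: Replaces the if/elif cascade of grouped substring tests with a flat keyword-to-priority map reduced in one pass with a running minimum; the answer is the category of the lowest-priority matching keyword, indexed from a category tuple.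
import Mathlib
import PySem

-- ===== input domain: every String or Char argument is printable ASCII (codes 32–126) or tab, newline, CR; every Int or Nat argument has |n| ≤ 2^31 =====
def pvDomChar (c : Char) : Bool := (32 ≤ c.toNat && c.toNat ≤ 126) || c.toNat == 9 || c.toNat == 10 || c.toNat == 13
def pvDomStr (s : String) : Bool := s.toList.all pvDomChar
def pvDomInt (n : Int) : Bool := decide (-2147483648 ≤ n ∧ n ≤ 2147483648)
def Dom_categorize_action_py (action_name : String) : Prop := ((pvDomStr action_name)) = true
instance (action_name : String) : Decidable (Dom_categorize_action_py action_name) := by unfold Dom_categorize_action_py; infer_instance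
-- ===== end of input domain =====

-- B replaces A's if/elif cascade with a one-pass running-minimum reduction over a flat keyword->priority map; alternative decomposition, same cost.


-- ===== PORT A =====
def categorize_action_py (action_name : String) : String :=
  let action_lower := PySem.Str.lower action_name
  if (["play", "pause", "stop", "next", "previous", "seek"] : List String).any
      (fun keyword => PySem.Str.isIn keyword action_lower) then "media_control"
  else if (["volume", "mute", "bass", "treble"] : List String).any
      (fun keyword => PySem.Str.isIn keyword action_lower) then "volume_control"
  else if (["get", "info", "status", "current", "list"] : List String).any
      (fun keyword => PySem.Str.isIn keyword action_lower) then "information_retrieval"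
  else if (["set", "config", "update", "add", "remove"] : List String).any
      (fun keyword => PySem.Str.isIn keyword action_lower) then "configuration"
  else if (["auth", "security", "login", "password"] : List String).any
      (fun keyword => PySem.Str.isIn keyword action_lower) then "security"
  else "other"

-- ===== PORT B =====
-- flat keyword -> priority map (dict iterated in insertion order)
def pvKeywordRank : List (String × Nat) :=
  [("play", 0), ("pause", 0), ("stop", 0), ("next", 0), ("previous", 0), ("seek", 0),
   ("volume", 1), ("mute", 1), ("bass", 1), ("treble", 1),
   ("get", 2), ("info", 2), ("status", 2), ("current", 2), ("list", 2),
   ("set", 3), ("config", 3), ("update", 3), ("add", 3), ("remove", 3),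
   ("auth", 4), ("security", 4), ("login", 4), ("password", 4)]

def pvCategories : List String :=
  ["media_control", "volume_control", "information_retrieval", "configuration", "security", "other"]

def categorize_action_py_alt (action_name : String) : String :=
  let s := PySem.Str.lower action_name
  let best := pvKeywordRank.foldl
    (fun best p => if PySem.Str.isIn p.1 s then min best p.2 else best) 5
  -- tuple index _CATEGORIES[best]: best is always in 0..5, so getD is exact here
  pvCategories.getD best "other"

-- ===== PRECONDITION & SPEC =====
def Spec_categorize_action_py (action_name : String) (out : String) : Prop := out = categorize_action_py_alt action_name
instance (action_name : String) (out : String) : Decidable (Spec_categorize_action_py action_name out) := by unfold Spec_categorize_action_py; infer_instance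

-- ===== CLAIM (what is proved, stated in full; the proofs are below) =====
def Claim_equal_categorize_action_py : Prop := ∀ (action_name : String), Dom_categorize_action_py action_name → Spec_categorize_action_py action_name (categorize_action_py action_name)

-- ===== LEMMAS AND PROOFS =====

-- folding the running minimum over a constant-rank keyword group is 'min acc r' iff some keyword of the group matches
theorem pv_foldl_const_rank (s : String) (r : Nat) (kws : List String) (acc : Nat) :
    (kws.map (fun k => (k, r))).foldl
      (fun best p => if PySem.Str.isIn p.1 s then min best p.2 else best) acc
    = if kws.any (fun k => PySem.Str.isIn k s) then min acc r else acc := by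
  induction kws generalizing acc with
  | nil => simp
  | cons k t ih =>
    simp only [List.map_cons, List.foldl_cons, List.any_cons]
    by_cases h : PySem.Str.isIn k s = true
    · rw [if_pos h, ih (min acc r)]
      simp only [h, Bool.true_or]
      rw [if_pos trivial]
      split <;> omega
    · have hf : PySem.Str.isIn k s = false := by
        revert h; cases PySem.Str.isIn k s <;> simp
      rw [if_neg h, ih acc]
      simp only [hf, Bool.false_or]

-- ===== VERDICT (by name: the statement is the Claim_ definition above) =====
theorem categorize_action_py_spec : Claim_equal_categorize_action_py := by
  intro a _
  unfold Spec_categorize_action_py categorize_action_py categorize_action_py_alt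
  have htab : pvKeywordRank =
      ((["play", "pause", "stop", "next", "previous", "seek"] : List String).map (fun k => (k, 0)))
      ++ ((["volume", "mute", "bass", "treble"] : List String).map (fun k => (k, 1)))
      ++ ((["get", "info", "status", "current", "list"] : List String).map (fun k => (k, 2)))
      ++ ((["set", "config", "update", "add", "remove"] : List String).map (fun k => (k, 3)))
      ++ ((["auth", "security", "login", "password"] : List String).map (fun k => (k, 4))) := rfl
  rw [htab]
  simp only [List.foldl_append, pv_foldl_const_rank]
  cases h1 : (["play", "pause", "stop", "next", "previous", "seek"] : List String).any
      (fun keyword => PySem.Str.isIn keyword (PySem.Str.lower a)) <;>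
  cases h2 : (["volume", "mute", "bass", "treble"] : List String).any
      (fun keyword => PySem.Str.isIn keyword (PySem.Str.lower a)) <;>
  cases h3 : (["get", "info", "status", "current", "list"] : List String).any
      (fun keyword => PySem.Str.isIn keyword (PySem.Str.lower a)) <;>
  cases h4 : (["set", "config", "update", "add", "remove"] : List String).any
      (fun keyword => PySem.Str.isIn keyword (PySem.Str.lower a)) <;>
  cases h5 : (["auth", "security", "login", "password"] : List String).any
      (fun keyword => PySem.Str.isIn keyword (PySem.Str.lower a)) <;>
  rfl
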